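-- pv_equiv track=rewrite | github.com/LocusLontrime/Python | CodeWars_Rush/5kyu/Subarrays_with_an_odd_number_of_odd_numbers_6kyu.py | solve
-- ===== SOURCE A (Python) =====
-- def solve(arr: list[int]) -> int:
--     evens = odds = sum_ = counter = 0
--     for i in range(len(arr) + 1):
--         sum_ += 1 if (i > 0 and arr[i - 1] % 2 != 0) else 0
--         if sum_ % 2 == 0:
--             counter, evens = counter + odds, evens + 1
--         else:
--             counter, odds = counter + evens, odds + 1
--     return counter
-- ===== SOURCE B (Python) =====
-- def solve(arr: list[int]) -> int:
--     even, odd, parity = 1, 0, 0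
--     for x in arr:
--         parity = (parity + x) % 2
--         if parity == 0:
--             even += 1
--         else:
--             odd += 1
--     return even * odd
-- ===== Notes on version B (the rewrite author's own statement) =====
-- stated objective: simpler
-- what changed: Instead of accumulating the answer inside the loop by adding the opposite parity-class count at every step, B only tallies how many prefix-sum parities are even vs odd (even=1 for the empty prefix) and returns the single product even*odd after the loop, using the identity that a subarray has an odd number of odds iff its bounding prefix parities differ.
import Mathlib
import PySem

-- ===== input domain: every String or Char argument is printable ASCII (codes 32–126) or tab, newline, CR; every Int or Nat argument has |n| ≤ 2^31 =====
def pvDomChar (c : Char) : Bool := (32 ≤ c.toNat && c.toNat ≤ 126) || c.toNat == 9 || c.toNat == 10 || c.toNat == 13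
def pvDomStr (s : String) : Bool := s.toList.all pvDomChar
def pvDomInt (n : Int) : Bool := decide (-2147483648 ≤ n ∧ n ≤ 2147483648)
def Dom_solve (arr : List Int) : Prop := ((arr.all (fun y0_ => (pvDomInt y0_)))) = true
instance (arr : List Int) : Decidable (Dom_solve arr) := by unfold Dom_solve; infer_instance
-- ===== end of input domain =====

-- B replaces A's in-loop answer accumulation by tallying even/odd prefix parities and one final product even*odd (objective: simpler).


-- ===== PORT A =====
-- state = (evens, odds, sum_, counter); loop body of A, exact for in-range indices (the guard 0 < i keeps i-1 in range)
def solveStepA (arr : List Int) (st : Int × Int × Int × Int) (i : Int) : Int × Int × Int × Int :=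
  match st with
  | (evens, odds, sum_, counter) =>
    let sum_ := sum_ + (if 0 < i ∧ PySem.Int.mod (PySem.List.pyGetD arr (i - 1) 0) 2 ≠ 0 then 1 else 0)
    if PySem.Int.mod sum_ 2 = 0 then (evens + 1, odds, sum_, counter + odds)
    else (evens, odds + 1, sum_, counter + evens)

def solve (arr : List Int) : Int :=
  ((PySem.List.pyRange 0 ((arr.length : Int) + 1) 1).foldl (solveStepA arr) (0, 0, 0, 0)).2.2.2

-- ===== PORT B =====
-- state = (even, odd, parity)
def solveStepB (st : Int × Int × Int) (x : Int) : Int × Int × Int :=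
  match st with
  | (even, odd, parity) =>
    let parity := PySem.Int.mod (parity + x) 2
    if parity = 0 then (even + 1, odd, parity) else (even, odd + 1, parity)

def solve_alt (arr : List Int) : Int :=
  let r := arr.foldl solveStepB (1, 0, 0)
  r.1 * r.2.1

-- ===== PRECONDITION & SPEC =====
def Spec_solve (arr : List Int) (out : Int) : Prop := out = solve_alt arr
instance (arr : List Int) (out : Int) : Decidable (Spec_solve arr out) := by unfold Spec_solve; infer_instance

-- ===== CLAIM (what is proved, stated in full; the proofs are below) =====
def Claim_equal_solve : Prop := ∀ (arr : List Int), Dom_solve arr → Spec_solve arr (solve arr)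

-- ===== LEMMAS AND PROOFS =====

-- Joint loop invariant: with matching even/odd tallies, matching parity, and counter = evens*odds,
-- A's index loop from j+1 and B's element loop over arr.drop j stay in lockstep.
lemma solve_loop_eq (rest : List Int) : ∀ (arr : List Int) (j : Nat) (E O S : Int),
    arr.drop j = rest →
    (((PySem.List.pyRange ((j : Int) + 1) ((arr.length : Int) + 1) 1).foldl (solveStepA arr)
        (E, O, S, E * O)).1 = (rest.foldl solveStepB (E, O, PySem.Int.mod S 2)).1) ∧
    (((PySem.List.pyRange ((j : Int) + 1) ((arr.length : Int) + 1) 1).foldl (solveStepA arr)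
        (E, O, S, E * O)).2.1 = (rest.foldl solveStepB (E, O, PySem.Int.mod S 2)).2.1) ∧
    (((PySem.List.pyRange ((j : Int) + 1) ((arr.length : Int) + 1) 1).foldl (solveStepA arr)
        (E, O, S, E * O)).2.2.2 =
      (rest.foldl solveStepB (E, O, PySem.Int.mod S 2)).1 *
        (rest.foldl solveStepB (E, O, PySem.Int.mod S 2)).2.1) := by
  induction rest with
  | nil =>
    intro arr j E O S hdrop
    have hj : arr.length ≤ j := by
      by_contra h
      have := List.drop_eq_nil_iff.mp hdrop
      omega
    rw [PySem.List.pyRange_one_eq_nil (by omega)]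
    simp [List.foldl]
  | cons x rest ih =>
    intro arr j E O S hdrop
    have hj : j < arr.length := by
      by_contra h
      rw [List.drop_eq_nil_iff.mpr (by omega)] at hdrop
      simp at hdrop
    have h0 : arr[j]? = some x := by
      have h : (List.drop j arr)[0]? = some x := by rw [hdrop]; rfl
      rw [List.getElem?_drop] at h
      simpa using h
    rw [PySem.List.pyRange_one_cons (by omega)]
    simp only [List.foldl_cons]
    have hstepA : solveStepA arr (E, O, S, E * O) ((j : Int) + 1) =
        (if PySem.Int.mod (S + (if PySem.Int.mod x 2 ≠ 0 then 1 else 0)) 2 = 0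
         then (E + 1, O, S + (if PySem.Int.mod x 2 ≠ 0 then 1 else 0), E * O + O)
         else (E, O + 1, S + (if PySem.Int.mod x 2 ≠ 0 then 1 else 0), E * O + E)) := by
      simp [solveStepA, h0, show (0:Int) < (j:Int) + 1 by omega]
    have hpar : PySem.Int.mod (S + (if PySem.Int.mod x 2 ≠ 0 then 1 else 0)) 2 =
        PySem.Int.mod (PySem.Int.mod S 2 + x) 2 := by
      simp only [PySem.Int.mod_eq_emod_of_pos (by omega : (0:Int) < 2)]
      by_cases h : x % 2 = 0
      · rw [if_neg (by simp [h])]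
        omega
      · rw [if_pos (by simp [h])]
        omega
    have hstepB : solveStepB (E, O, PySem.Int.mod S 2) x =
        (if PySem.Int.mod (PySem.Int.mod S 2 + x) 2 = 0
         then (E + 1, O, PySem.Int.mod (PySem.Int.mod S 2 + x) 2)
         else (E, O + 1, PySem.Int.mod (PySem.Int.mod S 2 + x) 2)) := by
      simp only [solveStepB]
    rw [hstepA, hstepB, hpar]
    have hdrop' : arr.drop (j + 1) = rest := by
      have h1 : List.drop 1 (List.drop j arr) = rest := by rw [hdrop]; rfl
      rw [List.drop_drop] at h1
      simpa [Nat.add_comm] using h1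
    have hcast : ((j : Int) + 1 + 1) = (((j + 1 : Nat) : Int) + 1) := by push_cast; ring
    by_cases hc : PySem.Int.mod (PySem.Int.mod S 2 + x) 2 = 0
    · rw [if_pos hc, if_pos hc]
      have hE : E * O + O = (E + 1) * O := by ring
      rw [hE, hcast, ← hpar]
      exact ih arr (j + 1) (E + 1) O (S + (if PySem.Int.mod x 2 ≠ 0 then 1 else 0)) hdrop'
    · rw [if_neg hc, if_neg hc]
      have hE : E * O + E = E * (O + 1) := by ring
      rw [hE, hcast, ← hpar]
      exact ih arr (j + 1) E (O + 1) (S + (if PySem.Int.mod x 2 ≠ 0 then 1 else 0)) hdrop'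

-- ===== VERDICT (by name: the statement is the Claim_ definition above) =====
theorem solve_spec : Claim_equal_solve := by
  intro arr _
  show solve arr = solve_alt arr
  unfold solve solve_alt
  rw [PySem.List.pyRange_one_cons (by omega : (0:Int) < (arr.length : Int) + 1)]
  simp only [List.foldl_cons]
  have h0 : solveStepA arr (0, 0, 0, 0) 0 = (1, 0, 0, 0) := by
    simp [solveStepA, PySem.Int.mod]
  rw [h0]
  have := solve_loop_eq arr arr 0 1 0 0 (by simp)
  simp only [Nat.cast_zero, zero_add, mul_zero] at this
  have hm : PySem.Int.mod 0 2 = 0 := by decide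
  rw [hm] at this
  exact this.2.2
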